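-- pv_equiv track=rewrite | github.com/peek-robot/lerobot | lerobot/scripts/serve_widowx.py | filter_type_overrides
-- ===== SOURCE A (Python) =====
-- def filter_type_overrides(overrides):
--     filtered = []
--     skip_next = False
--     for i, arg in enumerate(overrides):
--         if skip_next:
--             skip_next = False
--             continue
--         # Remove --type or --policy.type and their value if split
--         if arg in ("--type", "--policy.type"):
--             skip_next = True
--             continue
--         if arg.startswith("--type=") or arg.startswith("--policy.type="):
--             continue
--         filtered.append(arg)
--     return filtered
-- ===== SOURCE B (Python) =====
-- def filter_type_overrides(overrides):
--     # Search-and-split: repeatedly find the first bare "--type"/"--policy.type",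
--     # emit the segment before it (minus "--type="/"--policy.type=" tokens),
--     # then drop the sentinel together with its value and continue after them.
--     def keep_segment(seg):
--         return [a for a in seg if not (a.startswith("--type=") or a.startswith("--policy.type="))]
--     out = []
--     rest = list(overrides)
--     while True:
--         try:
--             idx = min(i for i, a in enumerate(rest) if a in ("--type", "--policy.type"))
--         except ValueError:
--             return out + keep_segment(rest)
--         out += keep_segment(rest[:idx])
--         rest = rest[idx + 2:]
-- ===== Notes on version B (the rewrite author's own statement) =====
-- stated objective: alternative
-- what changed: Replaced the single-pass skip_next state machine by a search-and-split algorithm: repeatedly find the first bare sentinel, emit the preceding segment with '--type='/'--policy.type=' tokens filtered out by a comprehension, drop the sentinel and its value, and continue on the remainder.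
import Mathlib
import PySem

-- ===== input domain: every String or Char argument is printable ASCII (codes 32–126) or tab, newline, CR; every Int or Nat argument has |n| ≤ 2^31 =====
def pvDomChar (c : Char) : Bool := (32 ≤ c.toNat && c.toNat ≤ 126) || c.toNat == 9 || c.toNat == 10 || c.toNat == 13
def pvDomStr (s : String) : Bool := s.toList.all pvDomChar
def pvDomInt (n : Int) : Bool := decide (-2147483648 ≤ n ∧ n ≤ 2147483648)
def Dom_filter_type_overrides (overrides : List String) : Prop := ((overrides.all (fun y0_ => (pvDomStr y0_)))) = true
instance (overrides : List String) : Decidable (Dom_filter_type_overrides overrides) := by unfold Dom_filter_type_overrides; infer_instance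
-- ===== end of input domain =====

-- B replaces A's skip_next state machine by a search-and-split decomposition (alternative; same O(n) cost).

-- ===== PORT A =====
-- A: for-loop over enumerate(overrides) carrying (filtered, skip_next); index unused.
def filter_type_overrides (overrides : List String) : List String :=
  (overrides.foldl
    (fun (st : List String × Bool) arg =>
      if st.2 then (st.1, false)
      else if arg = "--type" ∨ arg = "--policy.type" then (st.1, true)
      else if PySem.Str.startswith arg "--type=" ∨ PySem.Str.startswith arg "--policy.type=" then (st.1, false)
      else (st.1 ++ [arg], false))
    ([], false)).1

-- ===== PORT B =====
-- B helper keep_segment: the comprehension filtering out '--type='/'--policy.type=' tokens.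
def keepSegment (seg : List String) : List String :=
  seg.filter (fun a => !(PySem.Str.startswith a "--type=" || PySem.Str.startswith a "--policy.type="))

-- B's loop: find the first bare sentinel (rest.takeWhile/dropWhile realise rest[:idx] / rest[idx:]),
-- emit keepSegment of the prefix, drop sentinel + value, recurse on the remainder.
def splitGo (rest : List String) : List String :=
  match h : rest.dropWhile (fun a => !(a == "--type" || a == "--policy.type")) with
  | [] => keepSegment (rest.takeWhile (fun a => !(a == "--type" || a == "--policy.type")))
  | _ :: rs =>
    keepSegment (rest.takeWhile (fun a => !(a == "--type" || a == "--policy.type"))) ++ splitGo rs.tail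
termination_by rest.length
decreasing_by
  have h1 : (rest.dropWhile (fun a => !(a == "--type" || a == "--policy.type"))).length ≤ rest.length :=
    rest.length_dropWhile_le _
  rw [h] at h1
  simp only [List.length_cons] at h1
  have h2 : rs.tail.length ≤ rs.length := by simp [List.length_tail]
  omega

def filter_type_overrides_alt (overrides : List String) : List String :=
  splitGo overrides

-- ===== PRECONDITION & SPEC =====
def Spec_filter_type_overrides (overrides : List String) (out : List String) : Prop := out = filter_type_overrides_alt overrides
instance (overrides : List String) (out : List String) : Decidable (Spec_filter_type_overrides overrides out) := by unfold Spec_filter_type_overrides; infer_instance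

-- ===== CLAIM (what is proved, stated in full; the proofs are below) =====
def Claim_equal_filter_type_overrides : Prop := ∀ (overrides : List String), Dom_filter_type_overrides overrides → Spec_filter_type_overrides overrides (filter_type_overrides overrides)

-- ===== LEMMAS AND PROOFS =====

def pvStepA (st : List String × Bool) (arg : String) : List String × Bool :=
  if st.2 then (st.1, false)
  else if arg = "--type" ∨ arg = "--policy.type" then (st.1, true)
  else if PySem.Str.startswith arg "--type=" ∨ PySem.Str.startswith arg "--policy.type=" then (st.1, false)
  else (st.1 ++ [arg], false)

lemma filter_type_overrides_eq_foldl (overrides : List String) :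
    filter_type_overrides overrides = (overrides.foldl pvStepA ([], false)).1 := rfl

lemma splitGo_drop_nil (rest : List String)
    (h : rest.dropWhile (fun a => !(a == "--type" || a == "--policy.type")) = []) :
    splitGo rest = keepSegment (rest.takeWhile (fun a => !(a == "--type" || a == "--policy.type"))) := by
  rw [splitGo]
  split
  · rfl
  · rename_i head rs heq
    rw [h] at heq
    cases heq

lemma splitGo_drop_cons (rest : List String) (y : String) (rs : List String)
    (h : rest.dropWhile (fun a => !(a == "--type" || a == "--policy.type")) = y :: rs) :
    splitGo rest =
      keepSegment (rest.takeWhile (fun a => !(a == "--type" || a == "--policy.type")))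
        ++ splitGo rs.tail := by
  rw [splitGo]
  split
  · rename_i heq
    rw [h] at heq
    cases heq
  · rename_i head rs2 heq
    rw [h] at heq
    injection heq with e1 e2
    subst e2
    rfl

lemma splitGo_nil : splitGo [] = [] := by
  rw [splitGo_drop_nil [] rfl]
  simp [keepSegment]

lemma splitGo_sent (x : String) (hx : x = "--type" ∨ x = "--policy.type") (xs : List String) :
    splitGo (x :: xs) = splitGo xs.tail := by
  have hp : (fun a => !(a == "--type" || a == "--policy.type")) x = false := by
    rcases hx with h | h <;> subst h <;> decide
  have hdrop : List.dropWhile (fun a => !(a == "--type" || a == "--policy.type")) (x :: xs)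
      = x :: xs := by
    rw [List.dropWhile_cons]; simp only [hp]; simp
  have htake : List.takeWhile (fun a => !(a == "--type" || a == "--policy.type")) (x :: xs)
      = [] := by
    rw [List.takeWhile_cons]; simp only [hp]; simp
  rw [splitGo_drop_cons (x :: xs) x xs hdrop, htake]
  simp [keepSegment]

lemma keepSegment_cons (x : String) (xs : List String) :
    keepSegment (x :: xs) =
      (if (PySem.Str.startswith x "--type=" || PySem.Str.startswith x "--policy.type=") = true
        then ([] : List String) else [x]) ++ keepSegment xs := by
  simp only [keepSegment, List.filter_cons]
  cases hb : (PySem.Str.startswith x "--type=" || PySem.Str.startswith x "--policy.type=") <;> simp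

lemma splitGo_cons_not_sent (x : String) (hx : ¬(x = "--type" ∨ x = "--policy.type"))
    (xs : List String) :
    splitGo (x :: xs) =
      (if (PySem.Str.startswith x "--type=" || PySem.Str.startswith x "--policy.type=") = true
        then ([] : List String) else [x]) ++ splitGo xs := by
  have hx1 : ¬ x = "--type" := fun h => hx (Or.inl h)
  have hx2 : ¬ x = "--policy.type" := fun h => hx (Or.inr h)
  have hp : (fun a => !(a == "--type" || a == "--policy.type")) x = true := by
    simp [hx1, hx2]
  have hdrop : List.dropWhile (fun a => !(a == "--type" || a == "--policy.type")) (x :: xs)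
      = List.dropWhile (fun a => !(a == "--type" || a == "--policy.type")) xs := by
    rw [List.dropWhile_cons]; simp only [hp]; simp
  have htake : List.takeWhile (fun a => !(a == "--type" || a == "--policy.type")) (x :: xs)
      = x :: List.takeWhile (fun a => !(a == "--type" || a == "--policy.type")) xs := by
    rw [List.takeWhile_cons]; simp only [hp]; simp
  cases hE : List.dropWhile (fun a => !(a == "--type" || a == "--policy.type")) xs with
  | nil =>
    rw [splitGo_drop_nil (x :: xs) (hdrop.trans hE), htake, keepSegment_cons,
      splitGo_drop_nil xs hE]
  | cons y rs =>
    rw [splitGo_drop_cons (x :: xs) y rs (hdrop.trans hE), htake, keepSegment_cons,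
      splitGo_drop_cons xs y rs hE, List.append_assoc]

lemma pvFoldA_gen : ∀ (n : Nat) (xs : List String), xs.length ≤ n → ∀ (acc : List String),
    (List.foldl pvStepA (acc, false) xs).1 = acc ++ splitGo xs := by
  intro n
  induction n with
  | zero =>
    intro xs hxs acc
    have : xs = [] := List.eq_nil_of_length_eq_zero (Nat.le_zero.1 hxs)
    subst this
    simp [splitGo_nil]
  | succ n ih =>
    intro xs hxs acc
    cases xs with
    | nil => simp [splitGo_nil]
    | cons x xs' =>
      by_cases hx : x = "--type" ∨ x = "--policy.type"
      · have hstep : pvStepA (acc, false) x = (acc, true) := by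
          simp [pvStepA, hx]
        rw [List.foldl_cons, hstep, splitGo_sent x hx]
        cases xs' with
        | nil => simp [splitGo_nil]
        | cons y ys =>
          have hstep2 : pvStepA (acc, true) y = (acc, false) := by simp [pvStepA]
          rw [List.foldl_cons, hstep2]
          have hlen : ys.length ≤ n := by simp at hxs; omega
          simpa using ih ys hlen acc
      · have hlen : xs'.length ≤ n := by simp at hxs; omega
        rw [splitGo_cons_not_sent x hx]
        by_cases hs : (PySem.Str.startswith x "--type=" = true ∨ PySem.Str.startswith x "--policy.type=" = true)
        · have hstep : pvStepA (acc, false) x = (acc, false) := by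
            unfold pvStepA
            rw [if_neg (by simp), if_neg hx, if_pos hs]
          have hb : (PySem.Str.startswith x "--type=" || PySem.Str.startswith x "--policy.type=") = true := by
            rcases hs with h | h <;> rw [h] <;> simp
          rw [List.foldl_cons, hstep, hb]
          simpa using ih xs' hlen acc
        · have hstep : pvStepA (acc, false) x = (acc ++ [x], false) := by
            unfold pvStepA
            rw [if_neg (by simp), if_neg hx, if_neg hs]
          obtain ⟨h1, h2⟩ := not_or.mp hs
          have hb : (PySem.Str.startswith x "--type=" || PySem.Str.startswith x "--policy.type=") = false := by
            rw [Bool.eq_false_iff.mpr h1, Bool.eq_false_iff.mpr h2]; rfl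
          rw [List.foldl_cons, hstep, hb]
          simpa using ih xs' hlen (acc ++ [x])

lemma pvFoldA_key : ∀ (xs acc : List String),
    (List.foldl pvStepA (acc, false) xs).1 = acc ++ splitGo xs := by
  intro xs acc
  exact pvFoldA_gen xs.length xs le_rfl acc

-- ===== VERDICT (by name: the statement is the Claim_ definition above) =====
theorem filter_type_overrides_spec : Claim_equal_filter_type_overrides := by
  intro xs _
  unfold Spec_filter_type_overrides filter_type_overrides_alt
  rw [filter_type_overrides_eq_foldl]
  simpa using pvFoldA_key xs []
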